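-- pv_equiv track=rewrite | github.com/annestrand/flintRV | scripts/common.py | getComments
-- ===== SOURCE A (Python) =====
-- def getComments(asmStr:str):
--     '''Converts multi-line assembly string to a list of comments'''
--     retList = []
--     tmpStr  = asmStr.split('\n')
--     for line in tmpStr:
--         index = line.rfind('#')
--         if (0 <= index) and index < len(line):
--             retList.append(line[line.rfind('#'):])
--     return retList
-- ===== SOURCE B (Python) =====
-- def getComments(asmStr: str):
--     '''Converts multi-line assembly string to a list of comments'''
--     res = []
--     cur = None                      # chars of the current line's comment, or None
--     for ch in asmStr:
--         if ch == '\n':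
--             if cur is not None:
--                 res.append(''.join(cur))
--             cur = None
--         elif ch == '#':
--             cur = ['#']             # a later '#' restarts the comment (last '#' wins)
--         elif cur is not None:
--             cur.append(ch)
--     if cur is not None:
--         res.append(''.join(cur))
--     return res
-- ===== Notes on version B (the rewrite author's own statement) =====
-- stated objective: alternative
-- what changed: B replaces the split-into-lines loop with rfind-per-line by a single character-level scan that maintains the current line's comment accumulator (restarted at each '#', flushed at each newline), never materialising the line list and never re-scanning a line backwards.
import Mathlib
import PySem

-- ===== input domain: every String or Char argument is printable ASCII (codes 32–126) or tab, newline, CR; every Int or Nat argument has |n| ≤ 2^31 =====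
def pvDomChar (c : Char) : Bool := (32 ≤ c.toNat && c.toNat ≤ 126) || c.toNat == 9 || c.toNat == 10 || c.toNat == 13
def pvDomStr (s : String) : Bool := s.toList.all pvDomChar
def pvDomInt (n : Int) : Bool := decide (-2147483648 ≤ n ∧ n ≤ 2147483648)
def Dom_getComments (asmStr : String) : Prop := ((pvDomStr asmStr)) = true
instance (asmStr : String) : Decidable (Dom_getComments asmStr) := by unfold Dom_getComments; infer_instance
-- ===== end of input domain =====

-- B replaces A's split-into-lines loop with rfind per line by a single character-level
-- scan keeping the current line's comment accumulator; same O(n) cost, alternative structure.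

-- ===== PORT A =====
def getComments (asmStr : String) : List String :=
  let tmpStr : List String := (PySem.Str.split? asmStr "\n").getD []
  tmpStr.foldl (fun retList line =>
    let index := PySem.Str.rfind line "#"
    if 0 ≤ index ∧ index < PySem.Str.len line then
      retList ++ [PySem.Str.slice line (some (PySem.Str.rfind line "#")) none]
    else retList) []

-- ===== PORT B =====
def getComments_alt (asmStr : String) : List String :=
  let fin := asmStr.toList.foldl (fun (st : List String × Option (List Char)) ch =>
    if ch = '\n' then
      (st.1 ++ (match st.2 with | some cur => [String.ofList cur] | none => []), none)
    else if ch = '#' then (st.1, some ['#'])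
    else match st.2 with
      | some cur => (st.1, some (cur ++ [ch]))
      | none => (st.1, none)) ([], none)
  fin.1 ++ (match fin.2 with | some cur => [String.ofList cur] | none => [])

-- ===== PRECONDITION & SPEC =====
def Spec_getComments (asmStr : String) (out : List String) : Prop := out = getComments_alt asmStr
instance (asmStr : String) (out : List String) : Decidable (Spec_getComments asmStr out) := by unfold Spec_getComments; infer_instance

-- ===== CLAIM (what is proved, stated in full; the proofs are below) =====
def Claim_equal_getComments : Prop := ∀ (asmStr : String), Dom_getComments asmStr → Spec_getComments asmStr (getComments asmStr)

-- ===== LEMMAS AND PROOFS =====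

-- index of the LAST '#' in a char list, built from the left
def hashIdx : List Char → Option Nat
  | [] => none
  | c :: r => match hashIdx r with
      | some k => some (k + 1)
      | none => if c = '#' then some 0 else none

lemma hashIdx_nil : hashIdx [] = none := rfl
lemma hashIdx_cons (c : Char) (r : List Char) : hashIdx (c :: r) =
    (match hashIdx r with | some k => some (k + 1) | none => if c = '#' then some 0 else none) := rfl

-- suffix of the line from its last '#', if any
def hashSuf (l : List Char) : Option (List Char) := (hashIdx l).map (l.drop ·)

def emit (l : List Char) : List (List Char) :=
  match hashSuf l with | some t => [t] | none => []

-- string splitting on '\n', structurally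
def glue (p : List Char) : List (List Char) → List (List Char)
  | [] => [p]
  | h :: t => (p ++ h) :: t

def splitNL : List Char → List (List Char)
  | [] => [[]]
  | c :: r => if c = '\n' then [] :: splitNL r else glue [c] (splitNL r)

lemma splitNL_nil : splitNL [] = [[]] := rfl
lemma splitNL_cons (c : Char) (r : List Char) :
    splitNL (c :: r) = if c = '\n' then [] :: splitNL r else glue [c] (splitNL r) := rfl

-- char-level model of B's fold
def stepB (st : List (List Char) × Option (List Char)) (ch : Char) : List (List Char) × Option (List Char) :=
  if ch = '\n' then
    (st.1 ++ (match st.2 with | some cur => [cur] | none => []), none)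
  else if ch = '#' then (st.1, some ['#'])
  else match st.2 with
    | some cur => (st.1, some (cur ++ [ch]))
    | none => (st.1, none)

def finB (st : List (List Char) × Option (List Char)) : List (List Char) :=
  st.1 ++ (match st.2 with | some cur => [cur] | none => [])

lemma splitNL_ne_nil (cs : List Char) : splitNL cs ≠ [] := by
  induction cs with
  | nil => simp [splitNL_nil]
  | cons c r ih =>
    rw [splitNL_cons]
    split
    · simp
    · cases h : splitNL r with
      | nil => exact absurd h ih
      | cons a t => simp [glue]

lemma glue_nil (ls : List (List Char)) (h : ls ≠ []) : glue [] ls = ls := by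
  cases ls with
  | nil => exact absurd rfl h
  | cons a t => simp [glue]

lemma glue_glue (p q : List Char) (ls : List (List Char)) :
    glue p (glue q ls) = glue (p ++ q) ls := by
  cases ls <;> simp [glue]

lemma prefixHash (c : Char) (t : List Char) : ['#'].isPrefixOf (c :: t) = ('#' == c) := by
  simp [List.isPrefixOf]

lemma hashIdx_lt_length (l : List Char) (k : Nat) (h : hashIdx l = some k) : k < l.length := by
  induction l generalizing k with
  | nil => simp [hashIdx_nil] at h
  | cons c r ih =>
    cases hr : hashIdx r with
    | some m =>
      rw [hashIdx_cons, hr] at h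
      simp at h; subst h
      have := ih m hr; simp; omega
    | none =>
      rw [hashIdx_cons, hr] at h
      by_cases hc : c = '#'
      · simp [hc] at h; subst h; simp
      · simp [hc] at h

lemma hashIdx_append (xs : List Char) (c : Char) :
    hashIdx (xs ++ [c]) = if c = '#' then some xs.length else hashIdx xs := by
  induction xs with
  | nil => simp [hashIdx_cons, hashIdx_nil]
  | cons a r ih =>
    simp only [List.cons_append, hashIdx_cons, ih]
    by_cases hc : c = '#'
    · simp [hc]
    · simp only [hc, if_false]

lemma rfind_go_spec (l : List Char) (j : Nat) :
    PySem.Chars.rfind.go l ['#'] j =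
      (match hashIdx (l.take (j + 1)) with | some k => (k : Int) | none => -1) := by
  induction j with
  | zero =>
    simp only [PySem.Chars.rfind.go]
    cases l with
    | nil => simp [hashIdx_nil]
    | cons c r =>
      rw [prefixHash]
      by_cases hc : c = '#'
      · subst hc; simp [hashIdx_cons, hashIdx_nil]
      · have h2 : ('#' == c) = false := beq_eq_false_iff_ne.mpr (Ne.symm hc)
        simp [h2, hashIdx_cons, hashIdx_nil, hc]
  | succ j ih =>
    rw [PySem.Chars.rfind.go]
    by_cases hj : j + 1 < l.length
    · have htake : l.take (j + 2) = l.take (j + 1) ++ [l[j+1]] := by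
        rw [List.take_add_one]
        simp [List.getElem?_eq_getElem hj]
      have hdrop : l.drop (j+1) = l[j+1] :: l.drop (j+2) := by
        rw [List.drop_eq_getElem_cons hj]
      rw [htake, hashIdx_append, hdrop, prefixHash]
      by_cases hc : l[j+1] = '#'
      · simp [hc, List.length_take, Nat.min_eq_left (le_of_lt hj)]
      · have h2 : ('#' == l[j+1]) = false := beq_eq_false_iff_ne.mpr (Ne.symm hc)
        simp only [h2, Bool.false_eq_true, if_false, ih, hc]
    · have h1 : l.take (j + 2) = l := List.take_of_length_le (by omega)
      have h2 : l.take (j + 1) = l := List.take_of_length_le (by omega)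
      have h3 : l.drop (j + 1) = [] := List.drop_eq_nil_of_le (by omega)
      simp [h3, List.isPrefixOf, ih, h1, h2]

lemma rfind_eq_hashIdx (l : List Char) :
    PySem.Chars.rfind l ['#'] =
      (match hashIdx l with | some k => (k : Int) | none => -1) := by
  have h := rfind_go_spec l l.length
  rw [List.take_of_length_le (by omega)] at h
  simpa [PySem.Chars.rfind] using h

-- A's per-line step equals appending `emit`
lemma lineA (acc : List (List Char)) (l : List Char) :
    (if 0 ≤ PySem.Chars.rfind l ['#'] ∧ PySem.Chars.rfind l ['#'] < (l.length : Int) then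
      acc ++ [PySem.List.slice l (some (PySem.Chars.rfind l ['#'])) none]
    else acc) = acc ++ emit l := by
  rw [rfind_eq_hashIdx]
  cases hk : hashIdx l with
  | none => simp [emit, hashSuf, hk]
  | some k =>
    have hlt := hashIdx_lt_length l k hk
    simp only [emit, hashSuf, hk, Option.map_some]
    rw [if_pos (by constructor <;> [exact Int.natCast_nonneg k; exact_mod_cast hlt])]
    rw [PySem.List.slice_from_natCast]

-- B's fold over a newline-free segment
lemma foldB_line (l : List Char) (hl : '\n' ∉ l) (acc : List (List Char)) (cur : Option (List Char)) :
    l.foldl stepB (acc, cur) =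
      (acc, match hashSuf l with | some t => some t | none => cur.map (· ++ l)) := by
  induction l generalizing cur with
  | nil => simp [hashSuf, hashIdx_nil]
  | cons c r ih =>
    have hc : c ≠ '\n' := fun h => hl (h ▸ List.mem_cons_self)
    have hr : '\n' ∉ r := fun h => hl (List.mem_cons_of_mem _ h)
    by_cases hh : c = '#'
    · rw [List.foldl_cons]
      have : stepB (acc, cur) c = (acc, some ['#']) := by simp [stepB, hc, hh]
      rw [this, ih hr]
      simp only [hashSuf, hashIdx_cons]
      cases hk : hashIdx r with
      | some k => simp [hk]
      | none => simp [hk, hh]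
    · rw [List.foldl_cons]
      have : stepB (acc, cur) c = (acc, cur.map (· ++ [c])) := by
        cases cur <;> simp [stepB, hc, hh]
      rw [this, ih hr]
      simp only [hashSuf, hashIdx_cons]
      cases hk : hashIdx r with
      | some k => simp [hk]
      | none =>
        simp only [hk, hh, if_false]
        cases cur <;> simp

lemma splitOn_go_spec (fuel : Nat) (l cur : List Char) (acc : List (List Char))
    (h : l.length < fuel) :
    PySem.Chars.splitOn.go ['\n'] fuel l cur acc =
      acc.reverse ++ glue cur.reverse (splitNL l) := by
  induction fuel generalizing l cur acc with
  | zero => omega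
  | succ f ih =>
    cases l with
    | nil =>
      simp [PySem.Chars.splitOn.go, splitNL_nil, glue]
    | cons c rest =>
      rw [PySem.Chars.splitOn.go]
      by_cases hc : c = '\n'
      · have hp : ['\n'].isPrefixOf (c :: rest) = true := by
          subst hc; simp [List.isPrefixOf]
        simp only [hp, if_true]
        have hd : List.drop (['\n'].length) (c :: rest) = rest := by simp
        rw [hd, ih rest [] (cur.reverse :: acc) (by simp at h ⊢; omega)]
        rw [splitNL_cons, if_pos hc]
        simp only [List.reverse_nil]
        rw [glue_nil _ (splitNL_ne_nil rest)]
        cases hs : splitNL rest with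
        | nil => exact absurd hs (splitNL_ne_nil rest)
        | cons a t => simp [glue]
      · have hp : ['\n'].isPrefixOf (c :: rest) = false := by
          simp [List.isPrefixOf]; exact fun h' => absurd h'.symm hc
        simp only [hp, Bool.false_eq_true, if_false]
        rw [ih rest (c :: cur) acc (by simp at h ⊢; omega)]
        rw [splitNL_cons, if_neg hc, glue_glue]
        simp

lemma splitOn_eq_splitNL (cs : List Char) :
    PySem.Chars.splitOn cs ['\n'] = splitNL cs := by
  rw [PySem.Chars.splitOn, splitOn_go_spec (cs.length + 1) cs [] [] (by omega)]
  simp [glue_nil _ (splitNL_ne_nil cs)]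

lemma split_decomp (cs : List Char) (h : '\n' ∈ cs) :
    ∃ l rest, cs = l ++ '\n' :: rest ∧ '\n' ∉ l := by
  induction cs with
  | nil => simp at h
  | cons c r ih =>
    by_cases hc : c = '\n'
    · exact ⟨[], r, by simp [hc], by simp⟩
    · have hr : '\n' ∈ r := by
        rcases List.mem_cons.mp h with h1 | h1
        · exact absurd h1.symm hc
        · exact h1
      obtain ⟨l, rest, heq, hnl⟩ := ih hr
      exact ⟨c :: l, rest, by simp [heq], by simp [hnl]; exact fun h' => hc h'.symm⟩

lemma splitNL_no_nl (cs : List Char) (h : '\n' ∉ cs) : splitNL cs = [cs] := by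
  induction cs with
  | nil => rfl
  | cons c r ih =>
    have hc : c ≠ '\n' := fun h' => h (h' ▸ List.mem_cons_self)
    have hr : '\n' ∉ r := fun h' => h (List.mem_cons_of_mem _ h')
    rw [splitNL_cons, if_neg hc, ih hr]
    simp [glue]

lemma splitNL_append_nl (l rest : List Char) (h : '\n' ∉ l) :
    splitNL (l ++ '\n' :: rest) = l :: splitNL rest := by
  induction l with
  | nil => simp [splitNL_cons]
  | cons c r ih =>
    have hc : c ≠ '\n' := fun h' => h (h' ▸ List.mem_cons_self)
    have hr : '\n' ∉ r := fun h' => h (List.mem_cons_of_mem _ h')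
    rw [List.cons_append, splitNL_cons, if_neg hc, ih hr]
    simp [glue]

lemma main_chars (n : Nat) (cs : List Char) (acc : List (List Char)) (hn : cs.length ≤ n) :
    finB (cs.foldl stepB (acc, none)) =
      (splitNL cs).foldl (fun a l => a ++ emit l) acc := by
  induction n generalizing cs acc with
  | zero =>
    have : cs = [] := List.eq_nil_of_length_eq_zero (by omega)
    subst this
    simp [finB, splitNL_nil, emit, hashSuf, hashIdx_nil]
  | succ n ih =>
    by_cases hmem : '\n' ∈ cs
    · obtain ⟨l, rest, heq, hnl⟩ := split_decomp cs hmem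
      subst heq
      rw [List.foldl_append, foldB_line l hnl acc none, List.foldl_cons]
      have hstep : stepB (acc, (match hashSuf l with | some t => some t | none => (none : Option (List Char)).map (· ++ l))) '\n'
          = (acc ++ emit l, none) := by
        cases ht : hashSuf l <;> simp [stepB, emit, ht]
      rw [hstep]
      have hlen : rest.length ≤ n := by simp at hn; omega
      rw [ih rest (acc ++ emit l) hlen, splitNL_append_nl l rest hnl, List.foldl_cons]
    · rw [foldB_line cs hmem acc none, splitNL_no_nl cs hmem]
      cases ht : hashSuf cs <;> simp [finB, emit, ht]

-- lift to strings: relate the two ports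
lemma liftA (lines : List (List Char)) (acc : List (List Char)) :
    (lines.map String.ofList).foldl (fun retList line =>
        let index := PySem.Str.rfind line "#"
        if 0 ≤ index ∧ index < PySem.Str.len line then
          retList ++ [PySem.Str.slice line (some (PySem.Str.rfind line "#")) none]
        else retList) (acc.map String.ofList) =
      (lines.foldl (fun a l => a ++ emit l) acc).map String.ofList := by
  induction lines generalizing acc with
  | nil => simp
  | cons l rest ih =>
    rw [List.map_cons, List.foldl_cons, List.foldl_cons]
    have hstep : (let index := PySem.Str.rfind (String.ofList l) "#"
        if 0 ≤ index ∧ index < PySem.Str.len (String.ofList l) then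
          acc.map String.ofList ++ [PySem.Str.slice (String.ofList l) (some (PySem.Str.rfind (String.ofList l) "#")) none]
        else acc.map String.ofList) = (acc ++ emit l).map String.ofList := by
      have hrf : PySem.Str.rfind (String.ofList l) "#" = PySem.Chars.rfind l ['#'] := by
        rw [PySem.Str.rfind_eq, String.toList_ofList]; rfl
      have hlen : PySem.Str.len (String.ofList l) = (l.length : Int) := by
        simp [PySem.Str.len]
      have hslice : PySem.Str.slice (String.ofList l) (some (PySem.Chars.rfind l ['#'])) none
          = String.ofList (PySem.List.slice l (some (PySem.Chars.rfind l ['#'])) none) := by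
        simp [PySem.Str.slice, PySem.Chars.slice]
      rw [← lineA acc l]
      simp only [hrf, hlen, hslice]
      by_cases hcond : 0 ≤ PySem.Chars.rfind l ['#'] ∧ PySem.Chars.rfind l ['#'] < (l.length : Int)
      · rw [if_pos hcond, if_pos hcond, List.map_append, List.map_cons, List.map_nil]
      · rw [if_neg hcond, if_neg hcond]
    rw [hstep, ih]

lemma stepB_lift (acc : List (List Char)) (cur : Option (List Char)) (ch : Char) :
    (if ch = '\n' then
        (acc.map String.ofList ++ (match cur with | some c => [String.ofList c] | none => []), (none : Option (List Char)))
      else if ch = '#' then (acc.map String.ofList, some ['#'])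
      else match cur with
        | some c => (acc.map String.ofList, some (c ++ [ch]))
        | none => (acc.map String.ofList, none)) =
      ((stepB (acc, cur) ch).1.map String.ofList, (stepB (acc, cur) ch).2) := by
  by_cases h1 : ch = '\n'
  · cases cur <;> simp [stepB, h1]
  · by_cases h2 : ch = '#'
    · cases cur <;> simp [stepB, h1, h2]
    · cases cur <;> simp [stepB, h1, h2]

lemma liftB (cs : List Char) (acc : List (List Char)) (cur : Option (List Char)) :
    cs.foldl (fun (st : List String × Option (List Char)) ch =>
      if ch = '\n' then
        (st.1 ++ (match st.2 with | some c => [String.ofList c] | none => []), none)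
      else if ch = '#' then (st.1, some ['#'])
      else match st.2 with
        | some c => (st.1, some (c ++ [ch]))
        | none => (st.1, none)) (acc.map String.ofList, cur) =
      ((cs.foldl stepB (acc, cur)).1.map String.ofList, (cs.foldl stepB (acc, cur)).2) := by
  induction cs generalizing acc cur with
  | nil => simp
  | cons ch rest ih =>
    rw [List.foldl_cons, List.foldl_cons]
    have h := stepB_lift acc cur ch
    calc List.foldl _ _ rest
        = List.foldl (fun (st : List String × Option (List Char)) ch =>
            if ch = '\n' then
              (st.1 ++ (match st.2 with | some c => [String.ofList c] | none => []), none)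
            else if ch = '#' then (st.1, some ['#'])
            else match st.2 with
              | some c => (st.1, some (c ++ [ch]))
              | none => (st.1, none))
            ((stepB (acc, cur) ch).1.map String.ofList, (stepB (acc, cur) ch).2) rest := by rw [← h]
      _ = _ := by rw [ih (stepB (acc, cur) ch).1 (stepB (acc, cur) ch).2]

lemma altB (asmStr : String) :
    getComments_alt asmStr = (finB (asmStr.toList.foldl stepB ([], none))).map String.ofList := by
  unfold getComments_alt
  have h := liftB asmStr.toList [] none
  simp only [List.map_nil] at h
  rw [h]
  cases h2 : (asmStr.toList.foldl stepB ([], none)).2 <;> simp [finB, h2]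

theorem getComments_spec : Claim_equal_getComments := by
  intro asmStr _h
  unfold Spec_getComments
  unfold getComments
  have htl : ("\n" : String).toList = ['\n'] := rfl
  have hsplit : PySem.Str.split? asmStr "\n" = some ((splitNL asmStr.toList).map String.ofList) := by
    simp [PySem.Str.split?, PySem.Chars.split?, htl, splitOn_eq_splitNL]
  rw [hsplit]
  simp only [Option.getD_some]
  have hA := liftA (splitNL asmStr.toList) []
  simp only [List.map_nil] at hA
  rw [hA, altB asmStr, main_chars asmStr.toList.length asmStr.toList [] (le_refl _)]
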